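-- pv_equiv track=rewrite | github.com/PUP-BSIT/exercise-15-mekus | mekus/olazo.py | _create_silhouette
-- ===== SOURCE A (Python) =====
-- def _create_silhouette(ascii_art):
--     """Convert ASCII art to silhouette effect."""
--     if not ascii_art:
--         return ""
--
--     SILHOUETTE_CHAR_MAP = {
--         "@": "@",
--         "\n": "\n",
--     }
--
--     return "".join(SILHOUETTE_CHAR_MAP.get(char, " ") for char in ascii_art)
-- ===== SOURCE B (Python) =====
-- import re
--
-- def _create_silhouette(ascii_art):
--     """Convert ASCII art to silhouette effect (regex one-pass)."""
--     if not ascii_art: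
--         return ""
--     return re.sub(r'[^@\n]', ' ', ascii_art)
-- ===== Notes on version B (the rewrite author's own statement) =====
-- stated objective: idiomatic
-- what changed: Replaced the per-character dict lookup with default and generator join by a single regex substitution that blanks every character outside the preserved class (at-sign and newline) in one engine pass.
import Mathlib
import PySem

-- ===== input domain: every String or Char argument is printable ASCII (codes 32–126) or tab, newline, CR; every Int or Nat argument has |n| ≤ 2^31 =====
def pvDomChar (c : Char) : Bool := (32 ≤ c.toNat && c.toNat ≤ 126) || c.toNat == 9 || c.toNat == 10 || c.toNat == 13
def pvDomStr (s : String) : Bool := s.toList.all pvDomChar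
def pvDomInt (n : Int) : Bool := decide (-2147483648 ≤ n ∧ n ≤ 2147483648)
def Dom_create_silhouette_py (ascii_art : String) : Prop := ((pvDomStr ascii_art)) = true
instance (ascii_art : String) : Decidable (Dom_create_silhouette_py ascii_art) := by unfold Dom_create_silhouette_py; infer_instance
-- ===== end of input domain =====

-- B replaces A's per-character dict lookup/join by a single regex substitution [^@\n] → ' ' (more idiomatic, same cost).

-- ===== PORT A =====
-- A's dict literal SILHOUETTE_CHAR_MAP
def silhouetteCharMap : PySem.Dict Char String := PySem.Dict.ofList [('@', "@"), ('\n', "\n")]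

def create_silhouette_py (ascii_art : String) : String :=
  if ascii_art == "" then ""
  else PySem.Str.join "" (ascii_art.toList.map (fun c => silhouetteCharMap.getD c " "))

-- ===== PORT B =====
-- the regex engine's action of re.sub(r'[^@\n]', ' ', s): each char not in {'@','\n'} becomes ' '
def silhouetteSub (c : Char) : Char := if c == '@' || c == '\n' then c else ' '

def create_silhouette_py_alt (ascii_art : String) : String :=
  if ascii_art == "" then ""
  else String.ofList (ascii_art.toList.map silhouetteSub)

-- ===== PRECONDITION & SPEC =====
def Spec_create_silhouette_py (ascii_art : String) (out : String) : Prop := out = create_silhouette_py_alt ascii_art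
instance (ascii_art : String) (out : String) : Decidable (Spec_create_silhouette_py ascii_art out) := by unfold Spec_create_silhouette_py; infer_instance

-- ===== CLAIM (what is proved, stated in full; the proofs are below) =====
def Claim_equal_create_silhouette_py : Prop := ∀ (ascii_art : String), Dom_create_silhouette_py ascii_art → Spec_create_silhouette_py ascii_art (create_silhouette_py ascii_art)

-- ===== LEMMAS AND PROOFS =====

theorem getD_silhouetteCharMap (c : Char) :
    silhouetteCharMap.getD c " " = String.ofList [silhouetteSub c] := by
  by_cases h1 : c = '@'
  · subst h1; decide
  · by_cases h2 : c = '\n'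
    · subst h2; decide
    · simp [silhouetteCharMap, silhouetteSub, PySem.Dict.getD, PySem.Dict.ofList,
            PySem.Dict.update, PySem.Dict.empty, PySem.Dict.insert, PySem.Dict.get?, h1, h2,
            Ne.symm h1, Ne.symm h2]

theorem join_singletons (cs : List Char) :
    PySem.Str.join "" (cs.map (fun c => String.ofList [silhouetteSub c])) = String.ofList (cs.map silhouetteSub) := by
  apply String.toList_injective
  simp only [PySem.Str.toList_join, List.map_map]
  have h : (String.toList ∘ fun c => String.ofList [silhouetteSub c])
      = (fun c => [silhouetteSub c]) := by funext c; simp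
  rw [h]
  have h2 : List.map (fun c => [silhouetteSub c]) cs
      = List.map (fun c => [c]) (List.map silhouetteSub cs) := by
    simp [List.map_map]
  rw [h2, show ("".toList) = ([] : List Char) from rfl, PySem.Chars.join_nil_singletons]
  simp

-- ===== VERDICT (by name: the statement is the Claim_ definition above) =====
theorem create_silhouette_py_spec : Claim_equal_create_silhouette_py := by
  intro s _
  unfold Spec_create_silhouette_py create_silhouette_py create_silhouette_py_alt
  split
  · rfl
  · simp only [getD_silhouetteCharMap]
    exact join_singletons s.toList
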